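-- pv_equiv track=rewrite | github.com/OmarSamirz/Fine-Tune-Tesseract-For-Arabic-Language | generate_word_char_error.py | extract_words_chars_error
-- ===== SOURCE A (Python) =====
-- def extract_words_chars_error(input_text, word_count, char_count, filename, is_word):
--     start_capture = False
--     lines = input_text.split('\n')
--     checkpoint = 'Count   Missed   %Right'
--
--     if is_word == True:
--         checkpoint = 'Non-stopwords'
--
--     counter = 0
--     for idx, line in enumerate(lines):
--         if (counter == 6 and is_word == True) or (counter == 3 and is_word == False):
--             start_capture = True
--         if (checkpoint in line or checkpoint in lines[idx-1]) and start_capture == False: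
--             counter += 1
--             continue
--
--         if start_capture:
--             line_lst = line.split()
--
--             if len(line_lst) == 0:
--                 continue
--
--             if is_word == False:
--                 char = line_lst[-1]
--                 new_count = int(line_lst[1])
--                 if line_lst[-2] == '{' and line_lst[-1] == '}':
--                     char = 'White Space'
--
--                 if char in char_count and new_count > 0:
--                     current_count, files = char_count[char]
--                     char_count[char] = (current_count + new_count, files + [filename])
--                 elif char not in char_count and new_count > 0:
--                     char_count[char] = (new_count, [filename])
--
--             else:
--                 word = line_lst[-1]
--                 new_count = int(line_lst[1])
--                 if word in word_count and new_count > 0: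
--                     count, files = word_count[word]
--                     word_count[word] = (count + new_count, files + [filename])
--                 elif word not in word_count and new_count > 0:
--                     word_count[line_lst[-1]] = (new_count, [filename])
--
--     return word_count, char_count
-- ===== SOURCE B (Python) =====
-- def extract_words_chars_error(input_text, word_count, char_count, filename, is_word):
--     lines = input_text.split('\n')
--     cp = 'Non-stopwords' if is_word else 'Count   Missed   %Right'
--     th = 6 if is_word else 3
--     # capture starts right after the th-th line matching the checkpoint condition
--     matches = [i for i in range(len(lines)) if cp in lines[i] or cp in lines[i - 1]]
--     start = matches[th - 1] + 1 if len(matches) >= th else len(lines)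
--     # aggregate the captured rows once: key -> (total count, number of contributing rows)
--     totals = {}
--     for line in lines[start:]:
--         parts = line.split()
--         if not parts:
--             continue
--         n = int(parts[1])
--         if n <= 0:
--             continue
--         key = 'White Space' if not is_word and parts[-2] == '{' and parts[-1] == '}' else parts[-1]
--         s, occ = totals.get(key, (0, 0))
--         totals[key] = (s + n, occ + 1)
--     # rebuild the target dict from the aggregate in one sweep (fresh dict, no per-line merging)
--     target = word_count if is_word else char_count
--     result = {}
--     for k, (c, files) in target.items():
--         if k in totals:
--             s, occ = totals[k]
--             result[k] = (c + s, files + [filename] * occ)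
--         else:
--             result[k] = (c, files)
--     for k, (s, occ) in totals.items():
--         if k not in result:
--             result[k] = (s, [filename] * occ)
--     if is_word:
--         return result, char_count
--     return word_count, result
-- ===== Notes on version B (the rewrite author's own statement) =====
-- stated objective: alternative
-- what changed: Replaces A's per-line in-place dict merging inside a flag/counter state machine by a different algorithm: the capture start is computed in closed form from the list of checkpoint-match indices, the captured rows are aggregated once into a key -> (total, occurrences) table, and the returned dict is rebuilt in a single sweep from the original entries plus that table (B builds a fresh dict instead of mutating the argument; return values are identical).
import Mathlib
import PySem

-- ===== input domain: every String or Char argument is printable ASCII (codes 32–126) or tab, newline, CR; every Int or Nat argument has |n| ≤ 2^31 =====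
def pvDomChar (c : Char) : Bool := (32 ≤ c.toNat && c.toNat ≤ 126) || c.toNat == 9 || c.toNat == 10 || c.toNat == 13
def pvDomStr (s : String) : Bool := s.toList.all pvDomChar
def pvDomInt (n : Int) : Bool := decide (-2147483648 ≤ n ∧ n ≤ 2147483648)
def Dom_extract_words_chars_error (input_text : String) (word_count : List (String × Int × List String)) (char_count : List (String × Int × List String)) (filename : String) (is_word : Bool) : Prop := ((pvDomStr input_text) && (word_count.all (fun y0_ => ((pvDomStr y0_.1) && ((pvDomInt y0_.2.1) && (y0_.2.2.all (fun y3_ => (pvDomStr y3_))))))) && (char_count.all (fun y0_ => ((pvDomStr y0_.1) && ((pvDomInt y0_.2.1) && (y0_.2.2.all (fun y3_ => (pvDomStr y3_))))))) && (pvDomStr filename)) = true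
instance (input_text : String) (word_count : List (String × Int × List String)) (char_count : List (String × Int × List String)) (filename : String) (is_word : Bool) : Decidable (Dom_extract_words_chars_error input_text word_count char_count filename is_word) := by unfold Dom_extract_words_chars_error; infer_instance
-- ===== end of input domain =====

-- ===== PORT A =====
-- B replaces A's one-pass flag/counter state machine with per-line in-place dict merging by a
-- different algorithm: closed-form capture start from the match-index list, one aggregation pass
-- into a key -> (total, occurrences) table, and one rebuild sweep of the dict from that table.
-- A mutates the passed dict in place, B builds a fresh one; the equivalence proved is about the
-- return value.
-- Dict primitives shared by both ports (Python dict as assoc list: first-match lookup, in-place overwrite else append).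
def pvLookupV {α : Type} (d : List (String × α)) (k : String) : Option α :=
  match d with
  | [] => none
  | (k', v) :: rest => if k' == k then some v else pvLookupV rest k

def pvStoreV {α : Type} (d : List (String × α)) (k : String) (v : α) : List (String × α) :=
  match d with
  | [] => [(k, v)]
  | (k', v') :: rest => if k' == k then (k', v) :: rest else (k', v') :: pvStoreV rest k v

-- one iteration of A's for-loop; state = (start_capture, counter, word_count, char_count)
def pvAStep (lines : List String) (checkpoint filename : String) (is_word : Bool)
    (st : Bool × Int × List (String × Int × List String) × List (String × Int × List String))
    (p : Int × String) :
    Bool × Int × List (String × Int × List String) × List (String × Int × List String) :=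
  let start_capture :=
    if (st.2.1 == 6 && is_word) || (st.2.1 == 3 && !is_word) then true else st.1
  -- lines[idx-1]: always in range for idx in 0..len-1 on a nonempty list (negative index wraps); pyGetD with dummy default
  if (PySem.Str.isIn checkpoint p.2 ||
      PySem.Str.isIn checkpoint (PySem.List.pyGetD lines (p.1 - 1) "")) && !start_capture then
    (start_capture, st.2.1 + 1, st.2.2.1, st.2.2.2)
  else if start_capture then
    let line_lst := PySem.Str.split₀ p.2
    if line_lst.length == 0 then (start_capture, st.2.1, st.2.2.1, st.2.2.2)
    else if !is_word then
      let ch := PySem.List.pyGetD line_lst (-1) ""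
      match PySem.Int.ofStr? (PySem.List.pyGetD line_lst 1 "") with
      | none => (start_capture, st.2.1, st.2.2.1, st.2.2.2)  -- int() ValueError / missing field IndexError: A raises, excluded by Pre_
      | some new_count =>
        let ch := if PySem.List.pyGetD line_lst (-2) "" == "{" &&
                     PySem.List.pyGetD line_lst (-1) "" == "}" then "White Space" else ch
        match pvLookupV st.2.2.2 ch with
        | some cf =>
          if new_count > 0 then
            (start_capture, st.2.1, st.2.2.1, pvStoreV st.2.2.2 ch (cf.1 + new_count, cf.2 ++ [filename]))
          else (start_capture, st.2.1, st.2.2.1, st.2.2.2)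
        | none =>
          if new_count > 0 then
            (start_capture, st.2.1, st.2.2.1, pvStoreV st.2.2.2 ch (new_count, [filename]))
          else (start_capture, st.2.1, st.2.2.1, st.2.2.2)
    else
      let word := PySem.List.pyGetD line_lst (-1) ""
      match PySem.Int.ofStr? (PySem.List.pyGetD line_lst 1 "") with
      | none => (start_capture, st.2.1, st.2.2.1, st.2.2.2)  -- A raises here, excluded by Pre_
      | some new_count =>
        match pvLookupV st.2.2.1 word with
        | some cf =>
          if new_count > 0 then
            (start_capture, st.2.1, pvStoreV st.2.2.1 word (cf.1 + new_count, cf.2 ++ [filename]), st.2.2.2)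
          else (start_capture, st.2.1, st.2.2.1, st.2.2.2)
        | none =>
          if new_count > 0 then
            (start_capture, st.2.1, pvStoreV st.2.2.1 word (new_count, [filename]), st.2.2.2)
          else (start_capture, st.2.1, st.2.2.1, st.2.2.2)
  else (start_capture, st.2.1, st.2.2.1, st.2.2.2)

def extract_words_chars_error (input_text : String) (word_count : List (String × Int × List String)) (char_count : List (String × Int × List String)) (filename : String) (is_word : Bool) : (List (String × Int × List String)) × (List (String × Int × List String)) :=
  let lines := (PySem.Str.split? input_text "\n").getD []  -- split('\n'); sep ≠ "" so split? is some
  let checkpoint := if is_word then "Non-stopwords" else "Count   Missed   %Right"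
  let st := (PySem.List.enumerate lines 0).foldl
    (pvAStep lines checkpoint filename is_word) (false, 0, word_count, char_count)
  (st.2.2.1, st.2.2.2)

-- ===== PORT B =====
-- aggregation step of Source B's totals loop: key -> (sum of counts, number of contributing rows)
def pvAgg (is_word : Bool) (totals : List (String × Int × Int)) (line : String) :
    List (String × Int × Int) :=
  let parts := PySem.Str.split₀ line
  if parts.isEmpty then totals
  else
    match PySem.Int.ofStr? (PySem.List.pyGetD parts 1 "") with
    | none => totals                          -- int() ValueError / IndexError: Source B raises, excluded by Pre_
    | some n =>
      if n ≤ 0 then totals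
      else
        let key := if !is_word && PySem.List.pyGetD parts (-2) "" == "{" &&
                      PySem.List.pyGetD parts (-1) "" == "}" then "White Space"
                   else PySem.List.pyGetD parts (-1) ""
        let so := (pvLookupV totals key).getD (0, 0)
        pvStoreV totals key (so.1 + n, so.2 + 1)

def extract_words_chars_error_alt (input_text : String) (word_count : List (String × Int × List String)) (char_count : List (String × Int × List String)) (filename : String) (is_word : Bool) : (List (String × Int × List String)) × (List (String × Int × List String)) :=
  let lines := (PySem.Str.split? input_text "\n").getD []
  let cp := if is_word then "Non-stopwords" else "Count   Missed   %Right"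
  let th : Int := if is_word then 6 else 3
  let ms := (PySem.List.pyRange 0 (lines.length : Int) 1).filter
    (fun idx => PySem.Str.isIn cp (PySem.List.pyGetD lines idx "") ||
      PySem.Str.isIn cp (PySem.List.pyGetD lines (idx - 1) ""))
  -- ms = match indices; ms[th-1] is in range by the guard; pyGetD with dummy default
  let start := if th ≤ (ms.length : Int) then PySem.List.pyGetD ms (th - 1) 0 + 1
               else (lines.length : Int)
  let totals := (PySem.List.slice lines (some start) none).foldl (pvAgg is_word) []
  let target := if is_word then word_count else char_count
  let result := target.map (fun e =>
    match pvLookupV totals e.1 with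
    | some so => (e.1, e.2.1 + so.1, e.2.2 ++ PySem.List.pyRepeat [filename] so.2)
    | none => e)
  let result := totals.foldl (fun r e =>
    if (pvLookupV r e.1).isNone then r ++ [(e.1, e.2.1, PySem.List.pyRepeat [filename] e.2.2)]
    else r) result
  if is_word then (result, char_count) else (word_count, result)

-- ===== PRECONDITION & SPEC =====
-- a line A parses without raising: empty split, or >= 2 fields with an int()-parsable second field
def pvOkLine (line : String) : Bool :=
  let parts := PySem.Str.split₀ line
  parts.isEmpty || (decide (2 ≤ parts.length) && (PySem.Int.ofStr? (PySem.List.pyGetD parts 1 "")).isSome)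

-- linear scan: every line reached once the checkpoint-match count (checkpoint in the line or in the
-- previous one, the previous of line 0 being the last line) has hit the threshold must be parsable
def pvPreAux (cp : String) (th : Nat) : List String → String → Nat → Bool
  | [], _, _ => true
  | l :: rest, prev, cnt =>
    (if th ≤ cnt then pvOkLine l else true) &&
    pvPreAux cp th rest l (cnt + (if PySem.Str.isIn cp l || PySem.Str.isIn cp prev then 1 else 0))

-- Pre_ excludes (a) exactly the inputs where A raises: some captured line splits to one field or its
-- second field is not int()-parsable; and (b) encodings of the target dict with duplicate keys,
-- which do not arise from a Python dict (a dict's keys are distinct).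
def Pre_extract_words_chars_error (input_text : String) (word_count : List (String × Int × List String)) (char_count : List (String × Int × List String)) (filename : String) (is_word : Bool) : Prop :=
  (let lines := (PySem.Str.split? input_text "\n").getD []
   let checkpoint := if is_word then "Non-stopwords" else "Count   Missed   %Right"
   let threshold : Nat := if is_word then 6 else 3
   pvPreAux checkpoint threshold lines ((lines.getLast?).getD "") 0 = true) ∧
  ((if is_word then word_count else char_count).map Prod.fst).Nodup
instance (input_text : String) (word_count : List (String × Int × List String)) (char_count : List (String × Int × List String)) (filename : String) (is_word : Bool) : Decidable (Pre_extract_words_chars_error input_text word_count char_count filename is_word) := by unfold Pre_extract_words_chars_error; infer_instance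

def pvWitness_extract_words_chars_error : String × (List (String × Int × List String)) × (List (String × Int × List String)) × String × Bool :=
  ("x\nCount   Missed   %Right\na 2 b\nc 3 d", [("w", (1, ["f"]))], [], "file1", false)

def Spec_extract_words_chars_error (input_text : String) (word_count : List (String × Int × List String)) (char_count : List (String × Int × List String)) (filename : String) (is_word : Bool) (out : (List (String × Int × List String)) × (List (String × Int × List String))) : Prop := out = extract_words_chars_error_alt input_text word_count char_count filename is_word
instance (input_text : String) (word_count : List (String × Int × List String)) (char_count : List (String × Int × List String)) (filename : String) (is_word : Bool) (out : (List (String × Int × List String)) × (List (String × Int × List String))) : Decidable (Spec_extract_words_chars_error input_text word_count char_count filename is_word out) := by unfold Spec_extract_words_chars_error; infer_instance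

-- ===== CLAIM (what is proved, stated in full; the proofs are below) =====
def Claim_equal_extract_words_chars_error : Prop := ∀ (input_text : String) (word_count : List (String × Int × List String)) (char_count : List (String × Int × List String)) (filename : String) (is_word : Bool), Dom_extract_words_chars_error input_text word_count char_count filename is_word → Pre_extract_words_chars_error input_text word_count char_count filename is_word → Spec_extract_words_chars_error input_text word_count char_count filename is_word (extract_words_chars_error input_text word_count char_count filename is_word)

-- ===== LEMMAS AND PROOFS =====

-- proof-side: A's in-capture behaviour on one line, as a per-line merge into the relevant dict
def pvMerge (filename : String) (is_word : Bool)
    (target : List (String × Int × List String)) (line : String) :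
    List (String × Int × List String) :=
  let parts := PySem.Str.split₀ line
  if parts.isEmpty then target
  else
    match PySem.Int.ofStr? (PySem.List.pyGetD parts 1 "") with
    | none => target
    | some new_count =>
      if new_count ≤ 0 then target
      else
        let key := if !is_word && PySem.List.pyGetD parts (-2) "" == "{" &&
                      PySem.List.pyGetD parts (-1) "" == "}" then "White Space"
                   else PySem.List.pyGetD parts (-1) ""
        match pvLookupV target key with
        | some cf => pvStoreV target key (cf.1 + new_count, cf.2 ++ [filename])
        | none => pvStoreV target key (new_count, [filename])

-- proof-side: the index at which A's capture begins (scan with counter, as in A's loop)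
def pvFindStart (lines : List String) (checkpoint : String) (threshold : Int) :
    List Int → Int → Int
  | [], _ => (lines.length : Int)
  | idx :: rest, counter =>
    if counter == threshold then idx
    else pvFindStart lines checkpoint threshold rest
      (if PySem.Str.isIn checkpoint (PySem.List.pyGetD lines idx "") ||
          PySem.Str.isIn checkpoint (PySem.List.pyGetD lines (idx - 1) "") then counter + 1
       else counter)

-- once the flag is true, one iteration of A is exactly a pvMerge on the relevant dict
theorem pv_step_true (lines : List String) (cp fn : String) (iw : Bool) (c : Int)
    (wc cc : List (String × Int × List String)) (p : Int × String) :
    pvAStep lines cp fn iw (true, c, wc, cc) p =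
      (true, c, (if iw then pvMerge fn iw wc p.2 else wc),
        (if iw then cc else pvMerge fn iw cc p.2)) := by
  cases iw <;>
  · simp only [pvAStep, pvMerge, ite_self]
    simp only [Bool.not_true, Bool.and_false, if_false, Bool.false_eq_true, ite_true,
      Bool.not_false, Bool.true_and]
    generalize PySem.Str.split₀ p.2 = parts
    rcases parts with _ | ⟨a, parts⟩
    · simp
    · have h0 : ((a :: parts).length == 0) = false := by simp
      simp only [h0, Bool.false_eq_true, if_false, List.isEmpty_cons]
      rcases hO : PySem.Int.ofStr? (PySem.List.pyGetD (a :: parts) 1 "") with _ | n <;>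
        simp only [hO]
      by_cases hn : n > 0
      · have hn' : (n ≤ 0) = False := by simp; omega
        rcases hL : pvLookupV cc (if (PySem.List.pyGetD (a :: parts) (-2) "" == "{" &&
              PySem.List.pyGetD (a :: parts) (-1) "" == "}") = true then "White Space"
              else PySem.List.pyGetD (a :: parts) (-1) "") with _ | cf <;>
          rcases hLw : pvLookupV wc (PySem.List.pyGetD (a :: parts) (-1) "") with _ | cf' <;>
          simp_all
      · have hn2 : n ≤ 0 := by omega
        rcases hL : pvLookupV cc (if (PySem.List.pyGetD (a :: parts) (-2) "" == "{" &&
              PySem.List.pyGetD (a :: parts) (-1) "" == "}") = true then "White Space"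
              else PySem.List.pyGetD (a :: parts) (-1) "") with _ | cf <;>
          rcases hLw : pvLookupV wc (PySem.List.pyGetD (a :: parts) (-1) "") with _ | cf' <;>
          simp_all

-- A's fold with the flag already true is a pvMerge fold over the same lines
theorem pv_fold_true (lines : List String) (cp fn : String) (iw : Bool) (c : Int) :
    ∀ (ps : List (Int × String)) (wc cc : List (String × Int × List String)),
    (ps.foldl (pvAStep lines cp fn iw) (true, c, wc, cc)) =
      (true, c, (if iw then (ps.map (fun q => q.2)).foldl (pvMerge fn iw) wc else wc),
        (if iw then cc else (ps.map (fun q => q.2)).foldl (pvMerge fn iw) cc)) := by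
  intro ps
  induction ps with
  | nil => intro wc cc; cases iw <;> simp
  | cons p ps ih =>
    intro wc cc
    rw [List.foldl_cons, pv_step_true]
    cases iw <;> simp [ih]

-- before the flag flips, one iteration of A only counts matches
theorem pv_flag_flip (lines : List String) (cp fn : String) (iw : Bool) (c : Int)
    (wc cc : List (String × Int × List String)) (p : Int × String)
    (h : ((c == 6 && iw) || (c == 3 && !iw)) = true) :
    pvAStep lines cp fn iw (false, c, wc, cc) p = pvAStep lines cp fn iw (true, c, wc, cc) p := by
  simp only [pvAStep, h, if_true]

theorem pv_step_false (lines : List String) (cp fn : String) (iw : Bool) (c : Int)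
    (wc cc : List (String × Int × List String)) (p : Int × String)
    (h : ((c == 6 && iw) || (c == 3 && !iw)) = false) :
    pvAStep lines cp fn iw (false, c, wc, cc) p =
      if (PySem.Str.isIn cp p.2 ||
          PySem.Str.isIn cp (PySem.List.pyGetD lines (p.1 - 1) "")) then
        (false, c + 1, wc, cc)
      else (false, c, wc, cc) := by
  simp only [pvAStep, h, if_false, Bool.false_eq_true, Bool.not_false, Bool.and_true]

-- the core correspondence: A's remaining loop from line i with counter c equals
-- find-start over the remaining indices followed by a pvMerge fold over the captured tail
theorem pv_phase (lines : List String) (cp fn : String) (iw : Bool) :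
    ∀ (rest : List String) (i : Nat) (c : Int)
      (wc cc : List (String × Int × List String)),
    lines.drop i = rest →
    ((PySem.List.enumerate rest (i : Int)).foldl (pvAStep lines cp fn iw)
        (false, c, wc, cc)).2.2 =
      (let start := pvFindStart lines cp (if iw then 6 else 3)
          (PySem.List.pyRange (i : Int) (lines.length : Int) 1) c
       let target := (PySem.List.slice lines (some start) none).foldl (pvMerge fn iw)
          (if iw then wc else cc)
       if iw then (target, cc) else (wc, target)) := by
  intro rest
  induction rest with
  | nil =>
    intro i c wc cc hdrop
    have hlen : lines.length ≤ i := List.drop_eq_nil_iff.mp hdrop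
    rw [PySem.List.pyRange_one_eq_nil (by exact_mod_cast hlen)]
    simp only [pvFindStart, PySem.List.enumerate_nil, List.foldl_nil]
    rw [PySem.List.slice_from _ (by exact_mod_cast Nat.zero_le _)]
    simp only [Int.toNat_natCast, List.drop_of_length_le le_rfl, List.foldl_nil]
    cases iw <;> simp
  | cons l rest ih =>
    intro i c wc cc hdrop
    have hi : i < lines.length := by
      by_contra h
      rw [List.drop_of_length_le (by omega)] at hdrop
      simp at hdrop
    have h2 : l :: rest = lines[i] :: lines.drop (i + 1) := by
      rw [← hdrop, List.drop_eq_getElem_cons hi]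
    injection h2 with hl hdrop'
    subst hl
    subst hdrop'
    have hcast : ((i : Int) + 1) = ((i + 1 : Nat) : Int) := by push_cast; ring
    have hgetD : PySem.List.pyGetD lines (i : Int) "" = lines[i] := by
      rw [PySem.List.pyGetD_natCast, List.getD_eq_getElem _ _ hi]
    rw [PySem.List.enumerate_cons, List.foldl_cons,
      PySem.List.pyRange_one_cons (by exact_mod_cast hi)]
    by_cases hc : c = (if iw then (6 : Int) else 3)
    · have hcond : ((c == 6 && iw) || (c == 3 && !iw)) = true := by
        subst hc; cases iw <;> simp
      have hbeq : (c == (if iw then (6 : Int) else 3)) = true := by simp [hc]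
      rw [pv_flag_flip _ _ _ _ _ _ _ _ hcond, pv_step_true, pv_fold_true]
      simp only [pvFindStart, hbeq, if_true]
      rw [PySem.List.slice_from _ (by exact_mod_cast Nat.zero_le _)]
      simp only [Int.toNat_natCast]
      cases iw <;> simp [PySem.List.map_snd_enumerate] <;> rw [hdrop, List.foldl_cons]
    · have hcond : ((c == 6 && iw) || (c == 3 && !iw)) = false := by
        cases iw <;> simp_all
      have hbeq : (c == (if iw then (6 : Int) else 3)) = false := by
        simpa using hc
      rw [pv_step_false _ _ _ _ _ _ _ _ hcond]
      simp only [pvFindStart, hbeq, Bool.false_eq_true, if_false, hgetD]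
      by_cases hm : (PySem.Str.isIn cp lines[i] ||
          PySem.Str.isIn cp (PySem.List.pyGetD lines ((i : Int) - 1) "")) = true
      · rw [if_pos hm, if_pos hm, hcast, ih (i + 1) (c + 1) wc cc rfl]
      · rw [if_neg hm, if_neg hm, hcast, ih (i + 1) c wc cc rfl]

-- ----- assoc-list toolbox for the rebuild correspondence -----

theorem pv_lookup_append {α : Type} (xs ys : List (String × α)) (k : String) :
    pvLookupV (xs ++ ys) k = (pvLookupV xs k).or (pvLookupV ys k) := by
  induction xs with
  | nil => simp [pvLookupV]
  | cons x xs ih =>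
    by_cases h : x.1 == k <;> simp [pvLookupV, h, ih]

theorem pv_lookup_eq_none {α : Type} (l : List (String × α)) (k : String) :
    pvLookupV l k = none ↔ k ∉ l.map Prod.fst := by
  induction l with
  | nil => simp [pvLookupV]
  | cons x xs ih =>
    by_cases h : x.1 == k
    · have : x.1 = k := eq_of_beq h
      simp [pvLookupV, h, this]
    · have hne : x.1 ≠ k := by simpa using h
      have hl : pvLookupV (x :: xs) k = pvLookupV xs k := by simp [pvLookupV, h]
      rw [hl, ih]
      simp only [List.map_cons, List.mem_cons, not_or]
      constructor
      · intro hn; exact ⟨fun he => hne he.symm, hn⟩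
      · intro hn; exact hn.2

theorem pv_lookup_mem {α : Type} (l : List (String × α)) (k : String) (v : α)
    (h : pvLookupV l k = some v) : (k, v) ∈ l := by
  induction l with
  | nil => simp [pvLookupV] at h
  | cons x xs ih =>
    by_cases hk : x.1 == k
    · have hx : x.1 = k := eq_of_beq hk
      simp [pvLookupV, hk] at h
      have : x = (k, v) := by
        cases x; simp_all
      simp [this]
    · simp [pvLookupV, hk] at h
      exact List.mem_cons_of_mem _ (ih h)

theorem pv_store_of_none {α : Type} (l : List (String × α)) (k : String) (v : α)
    (h : pvLookupV l k = none) : pvStoreV l k v = l ++ [(k, v)] := by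
  induction l with
  | nil => simp [pvStoreV]
  | cons x xs ih =>
    by_cases hk : x.1 == k <;> simp [pvLookupV, hk] at h ⊢ <;> simp [pvStoreV, hk, ih h]

theorem pv_store_append_left {α : Type} (xs ys : List (String × α)) (k : String) (v : α)
    (h : pvLookupV xs k ≠ none) : pvStoreV (xs ++ ys) k v = pvStoreV xs k v ++ ys := by
  induction xs with
  | nil => simp [pvLookupV] at h
  | cons x xs ih =>
    by_cases hk : x.1 == k <;> simp [pvLookupV, hk] at h <;> simp [pvStoreV, hk]
    exact ih h

theorem pv_store_append_right {α : Type} (xs ys : List (String × α)) (k : String) (v : α)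
    (h : pvLookupV xs k = none) : pvStoreV (xs ++ ys) k v = xs ++ pvStoreV ys k v := by
  induction xs with
  | nil => simp
  | cons x xs ih =>
    by_cases hk : x.1 == k <;> simp [pvLookupV, hk] at h <;> simp [pvStoreV, hk]
    exact ih h

theorem pv_lookup_store_self {α : Type} (l : List (String × α)) (k : String) (v : α) :
    pvLookupV (pvStoreV l k v) k = some v := by
  induction l with
  | nil => simp [pvStoreV, pvLookupV]
  | cons x xs ih =>
    by_cases hk : x.1 == k <;> simp [pvStoreV, hk, pvLookupV, ih]

theorem pv_lookup_store_ne {α : Type} (l : List (String × α)) (k k' : String) (v : α)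
    (h : k' ≠ k) : pvLookupV (pvStoreV l k v) k' = pvLookupV l k' := by
  have hbk : (k == k') = false := by simp; exact fun he => h he.symm
  induction l with
  | nil => simp [pvStoreV, pvLookupV, hbk]
  | cons x xs ih =>
    by_cases hk : x.1 == k
    · have hx : x.1 = k := eq_of_beq hk
      have hbk' : (x.1 == k') = false := by simp [hx]; exact fun he => h he.symm
      simp [pvStoreV, hk, pvLookupV, hbk']
    · by_cases hk' : x.1 == k' <;> simp [pvStoreV, hk, pvLookupV, hk', ih]

theorem pv_map_fst_store_some {α : Type} (l : List (String × α)) (k : String) (v : α)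
    (h : pvLookupV l k ≠ none) : (pvStoreV l k v).map Prod.fst = l.map Prod.fst := by
  induction l with
  | nil => simp [pvLookupV] at h
  | cons x xs ih =>
    by_cases hk : x.1 == k <;> simp [pvLookupV, hk] at h <;> simp [pvStoreV, hk]
    exact ih h

theorem pv_filter_store {α : Type} (p : String × α → Bool) (l : List (String × α))
    (k : String) (v : α) (hp : ∀ v', p (k, v') = false) :
    (pvStoreV l k v).filter p = l.filter p := by
  induction l with
  | nil => simp [pvStoreV, hp]
  | cons x xs ih =>
    by_cases hk : x.1 == k
    · have hx1 : x.1 = k := eq_of_beq hk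
      have hx : x = (k, x.2) := by cases x; simp_all
      rw [hx]
      simp [pvStoreV, List.filter_cons, hp]
    · simp [pvStoreV, hk, List.filter_cons, ih]

-- ----- the rebuild view of B -----

def pvMk (fn : String) (e : String × Int × Int) : String × Int × List String :=
  (e.1, e.2.1, List.replicate e.2.2.toNat fn)

def pvUpd (fn : String) (A : List (String × Int × Int)) (e : String × Int × List String) :
    String × Int × List String :=
  match pvLookupV A e.1 with
  | some so => (e.1, e.2.1 + so.1, e.2.2 ++ List.replicate so.2.toNat fn)
  | none => e

def pvRebuild (fn : String) (t : List (String × Int × List String))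
    (A : List (String × Int × Int)) : List (String × Int × List String) :=
  t.map (pvUpd fn A) ++
    (A.filter (fun e => (pvLookupV t e.1).isNone)).map (pvMk fn)

theorem pv_lookup_map_upd (fn : String) (A : List (String × Int × Int))
    (t : List (String × Int × List String)) (k : String) :
    pvLookupV (t.map (pvUpd fn A)) k = (pvLookupV t k).map (fun v => (pvUpd fn A (k, v)).2) := by
  induction t with
  | nil => simp [pvLookupV]
  | cons x xs ih =>
    have hfst : (pvUpd fn A x).1 = x.1 := by
      unfold pvUpd; rcases pvLookupV A x.1 with _ | so <;> simp
    by_cases hk : x.1 == k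
    · have hx : x.1 = k := eq_of_beq hk
      subst hx
      simp only [List.map_cons, pvLookupV, hfst, hk, if_true, Option.map_some]
    · have hk' : (x.1 == k) = false := by simpa using hk
      simp only [List.map_cons, pvLookupV, hfst, hk', Bool.false_eq_true, if_false, ih]

theorem pv_lookup_fm (fn : String) (A : List (String × Int × Int))
    (t : List (String × Int × List String)) (k : String) :
    pvLookupV ((A.filter (fun e => (pvLookupV t e.1).isNone)).map (pvMk fn)) k =
      if (pvLookupV t k).isNone then
        (pvLookupV A k).map (fun so => (so.1, List.replicate so.2.toNat fn))
      else none := by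
  induction A with
  | nil => simp [pvLookupV]
  | cons x xs ih =>
    by_cases hp : (pvLookupV t x.1).isNone
    · rw [List.filter_cons_of_pos (by simpa using hp), List.map_cons]
      by_cases hk : x.1 == k
      · have hx : x.1 = k := eq_of_beq hk
        subst hx
        simp [pvLookupV, pvMk, hp]
      · have hk' : (x.1 == k) = false := by simpa using hk
        have hl : pvLookupV (pvMk fn x :: (xs.filter
            (fun e => (pvLookupV t e.1).isNone)).map (pvMk fn)) k =
            pvLookupV ((xs.filter (fun e => (pvLookupV t e.1).isNone)).map (pvMk fn)) k := by
          simp [pvLookupV, pvMk, hk']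
        rw [hl, ih]
        simp [pvLookupV, hk']
    · rw [List.filter_cons_of_neg (by simpa using hp), ih]
      by_cases hk : x.1 == k
      · have hx : x.1 = k := eq_of_beq hk
        subst hx
        have hp' : (pvLookupV t x.1).isNone = false := Bool.eq_false_iff.mpr hp
        simp [pvLookupV, hp']
      · have hk' : (x.1 == k) = false := by simpa using hk
        simp [pvLookupV, hk']

theorem pv_store_fm (fn : String) (A : List (String × Int × Int)) (t : List (String × Int × List String))
    (k : String) (v' : Int × Int)
    (hA : pvLookupV A k ≠ none) (ht : (pvLookupV t k).isNone = true) :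
    pvStoreV ((A.filter (fun e => (pvLookupV t e.1).isNone)).map (pvMk fn)) k (pvMk fn (k, v')).2 =
      ((pvStoreV A k v').filter (fun e => (pvLookupV t e.1).isNone)).map (pvMk fn) := by
  induction A with
  | nil => simp [pvLookupV] at hA
  | cons x xs ih =>
    by_cases hk : x.1 == k
    · have hx : x.1 = k := eq_of_beq hk
      subst hx
      rw [List.filter_cons_of_pos (by simpa using ht), List.map_cons]
      have hstore : pvStoreV (x :: xs) x.1 v' = (x.1, v') :: xs := by
        simp [pvStoreV]
      rw [hstore, List.filter_cons_of_pos (by simpa using ht), List.map_cons]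
      simp [pvStoreV, pvMk]
    · have hk' : (x.1 == k) = false := by simpa using hk
      have hA' : pvLookupV xs k ≠ none := by
        simpa [pvLookupV, hk'] using hA
      have hstore : pvStoreV (x :: xs) k v' = x :: pvStoreV xs k v' := by
        simp [pvStoreV, hk']
      rw [hstore]
      by_cases hp : (pvLookupV t x.1).isNone
      · rw [List.filter_cons_of_pos (by simpa using hp), List.map_cons,
          List.filter_cons_of_pos (by simpa using hp), List.map_cons]
        have hmk : ((pvMk fn x).1 == k) = false := by simpa [pvMk] using hk'
        rw [show pvStoreV (pvMk fn x :: (xs.filter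
            (fun e => (pvLookupV t e.1).isNone)).map (pvMk fn)) k (pvMk fn (k, v')).2 =
            pvMk fn x :: pvStoreV ((xs.filter
              (fun e => (pvLookupV t e.1).isNone)).map (pvMk fn)) k (pvMk fn (k, v')).2 from by
          simp [pvStoreV, hmk]]
        rw [ih hA']
      · rw [List.filter_cons_of_neg (by simpa using hp),
          List.filter_cons_of_neg (by simpa using hp)]
        exact ih hA'

theorem pv_map_congr_off (fn : String) (A : List (String × Int × Int)) (k : String)
    (v : Int × Int) (t : List (String × Int × List String))
    (h : ∀ e ∈ t, e.1 ≠ k) :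
    t.map (pvUpd fn (pvStoreV A k v)) = t.map (pvUpd fn A) := by
  apply List.map_congr_left
  intro e he
  unfold pvUpd
  rw [pv_lookup_store_ne _ _ _ _ (h e he)]

theorem pv_store_map_upd (fn : String) (A : List (String × Int × Int)) (k : String)
    (v : Int × Int) (t : List (String × Int × List String))
    (hnd : (t.map Prod.fst).Nodup) (c : Int) (fl : List String)
    (hT : pvLookupV t k = some (c, fl)) :
    pvStoreV (t.map (pvUpd fn A)) k ((pvUpd fn (pvStoreV A k v) (k, c, fl)).2) =
      t.map (pvUpd fn (pvStoreV A k v)) := by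
  induction t with
  | nil => simp [pvLookupV] at hT
  | cons x xs ih =>
    have hfst : ∀ B, (pvUpd fn B x).1 = x.1 := by
      intro B; unfold pvUpd; rcases pvLookupV B x.1 with _ | so <;> simp
    by_cases hk : x.1 == k
    · have hx : x.1 = k := eq_of_beq hk
      have hval : x.2 = (c, fl) := by
        simp [pvLookupV, hk] at hT; exact hT
      have hxx : x = (k, c, fl) := by
        obtain ⟨x1, x2⟩ := x
        simp only at hx hval
        rw [hx, hval]
      subst hxx
      have hnot : ∀ e ∈ xs, e.1 ≠ k := by
        intro e he heq
        have hmem : e.1 ∈ xs.map Prod.fst := List.mem_map_of_mem he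
        rw [heq] at hmem
        exact (List.nodup_cons.mp (by simpa using hnd)).1 hmem
      simp only [List.map_cons, pvStoreV, hfst, BEq.rfl, if_true]
      rw [pv_map_congr_off fn A k v xs hnot]
      congr 1
      unfold pvUpd
      rcases pvLookupV (pvStoreV A k v) k with _ | so <;> simp
    · have hk2 : (x.1 == k) = false := Bool.eq_false_iff.mpr hk
      have hT' : pvLookupV xs k = some (c, fl) := by simpa [pvLookupV, hk2] using hT
      have hnd' : (xs.map Prod.fst).Nodup := by
        simpa using (List.nodup_cons.mp (by simpa using hnd)).2
      simp only [List.map_cons, pvStoreV, hfst, hk2, Bool.false_eq_true, if_false]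
      congr 1
      · unfold pvUpd
        rw [pv_lookup_store_ne A k x.1 v (by simpa using hk)]
        rcases h : pvLookupV A x.1 with _ | so <;> simp [h]
      · exact ih hnd' hT'

-- one merged line = one aggregated line, through the rebuild
theorem pv_merge_rebuild (fn : String) (iw : Bool) (line : String)
    (t : List (String × Int × List String)) (A : List (String × Int × Int))
    (hnd : (t.map Prod.fst).Nodup) (hocc : ∀ e ∈ A, 0 ≤ e.2.2) :
    pvMerge fn iw (pvRebuild fn t A) line = pvRebuild fn t (pvAgg iw A line) := by
  unfold pvMerge pvAgg
  generalize PySem.Str.split₀ line = parts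
  by_cases hemp : parts.isEmpty
  · simp [hemp]
  · simp only [hemp, Bool.false_eq_true, if_false]
    rcases hO : PySem.Int.ofStr? (PySem.List.pyGetD parts 1 "") with _ | n
    · simp
    · simp only []
      by_cases hn : n ≤ 0
      · simp [hn]
      · simp only [hn, if_false]
        generalize (if !iw && PySem.List.pyGetD parts (-2) "" == "{" &&
          PySem.List.pyGetD parts (-1) "" == "}" then "White Space"
          else PySem.List.pyGetD parts (-1) "") = k
        have hlk := pv_lookup_append (t.map (pvUpd fn A))
          ((A.filter (fun e => (pvLookupV t e.1).isNone)).map (pvMk fn)) k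
        rcases hT : pvLookupV t k with _ | cfl
        · have hmapnone : pvLookupV (t.map (pvUpd fn A)) k = none := by
            rw [pv_lookup_map_upd, hT]; rfl
          have hkeys : ∀ e ∈ t, e.1 ≠ k := by
            intro e he heq
            exact (pv_lookup_eq_none t k).mp hT (heq ▸ List.mem_map_of_mem he)
          rcases hA : pvLookupV A k with _ | so
          · -- fresh key: both append at the very end
            have hrebuild : pvLookupV (pvRebuild fn t A) k = none := by
              unfold pvRebuild
              rw [hlk, hmapnone, pv_lookup_fm, hT, hA]
              simp
            rw [hrebuild]
            simp only [hA, Option.getD_none]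
            rw [pv_store_of_none _ _ _ hrebuild]
            unfold pvRebuild
            rw [pv_map_congr_off fn A k _ t hkeys]
            rw [pv_store_of_none _ _ _ hA, List.filter_append, List.map_append,
              List.append_assoc]
            congr 2
            simp [List.filter_cons, hT, pvMk]
          · -- key only in the aggregate: store lands in the appended block
            have hso : 0 ≤ so.2 := hocc (k, so) (pv_lookup_mem _ _ _ hA)
            have hfm : pvLookupV ((A.filter (fun e => (pvLookupV t e.1).isNone)).map (pvMk fn)) k =
                some (so.1, List.replicate so.2.toNat fn) := by
              rw [pv_lookup_fm, hT, hA]; simp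
            have hrebuild : pvLookupV (pvRebuild fn t A) k =
                some (so.1, List.replicate so.2.toNat fn) := by
              unfold pvRebuild; rw [hlk, hmapnone, hfm]; rfl
            rw [hrebuild]
            simp only [hA, Option.getD_some]
            unfold pvRebuild
            rw [pv_store_append_right _ _ _ _ hmapnone]
            rw [pv_map_congr_off fn A k _ t hkeys]
            congr 1
            have hv : (so.1 + n, List.replicate so.2.toNat fn ++ [fn]) =
                (pvMk fn (k, (so.1 + n, so.2 + 1))).2 := by
              simp [pvMk]
              rw [show (so.2 + 1).toNat = so.2.toNat + 1 by omega, List.replicate_succ']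
            rw [hv, pv_store_fm fn A t k _ (by rw [hA]; simp) (by rw [hT]; rfl)]
        · -- key present in the target dict: store lands in the mapped block
          have hmap : pvLookupV (t.map (pvUpd fn A)) k =
              some ((pvUpd fn A (k, cfl)).2) := by
            rw [pv_lookup_map_upd, hT]; rfl
          have hrebuild : pvLookupV (pvRebuild fn t A) k =
              some ((pvUpd fn A (k, cfl)).2) := by
            unfold pvRebuild; rw [hlk, hmap]; rfl
          rcases cfl with ⟨c, fl⟩
          rw [hrebuild]
          show pvStoreV (pvRebuild fn t A) k
            ((pvUpd fn A (k, c, fl)).2.1 + n, (pvUpd fn A (k, c, fl)).2.2 ++ [fn]) = _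
          unfold pvRebuild
          rw [pv_store_append_left _ _ _ _ (by rw [hmap]; simp)]
          congr 1
          · -- mapped block
            have hval : ((pvUpd fn A (k, c, fl)).2.1 + n,
                (pvUpd fn A (k, c, fl)).2.2 ++ [fn]) =
                (pvUpd fn (pvStoreV A k (((pvLookupV A k).getD (0,0)).1 + n,
                  ((pvLookupV A k).getD (0,0)).2 + 1)) (k, c, fl)).2 := by
              unfold pvUpd
              rw [pv_lookup_store_self]
              rcases hA : pvLookupV A k with _ | so
              · simp
              · have hso : 0 ≤ so.2 := hocc (k, so) (pv_lookup_mem _ _ _ hA)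
                have h1 : (so.2 + 1).toNat = so.2.toNat + 1 := by omega
                simp [hA, h1, List.replicate_succ']
                try constructor
                all_goals first | ring | simp
            rw [hval, pv_store_map_upd fn A k _ t hnd c fl hT]
          · -- appended block unchanged
            rw [pv_filter_store _ _ _ _ (by intro v'; simp [hT])]


-- ----- preservation of the aggregate's invariants -----

theorem pv_mem_store {α : Type} (l : List (String × α)) (k : String) (v : α) :
    ∀ x ∈ pvStoreV l k v, x ∈ l ∨ x = (k, v) := by
  induction l with
  | nil => simp [pvStoreV]
  | cons y ys ih =>
    intro x hx
    by_cases hk : y.1 == k <;> simp [pvStoreV, hk] at hx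
    · rcases hx with hx | hx
      · right; rw [hx, eq_of_beq hk]
      · left; exact List.mem_cons_of_mem _ hx
    · rcases hx with hx | hx
      · left; simp [hx]
      · rcases ih x hx with h | h
        · left; exact List.mem_cons_of_mem _ h
        · right; exact h

theorem pv_agg_occ (iw : Bool) (line : String) (A : List (String × Int × Int))
    (h : ∀ e ∈ A, 0 ≤ e.2.2) : ∀ e ∈ pvAgg iw A line, 0 ≤ e.2.2 := by
  unfold pvAgg
  by_cases hemp : (PySem.Str.split₀ line).isEmpty
  · simpa [hemp] using h
  · simp only [hemp, Bool.false_eq_true, if_false]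
    rcases hO : PySem.Int.ofStr? (PySem.List.pyGetD (PySem.Str.split₀ line) 1 "") with _ | n
    · simpa using h
    · simp only []
      by_cases hn : n ≤ 0
      · simpa [hn] using h
      · simp only [hn, if_false]
        intro e he
        generalize hk : (if !iw && PySem.List.pyGetD (PySem.Str.split₀ line) (-2) "" == "{" &&
          PySem.List.pyGetD (PySem.Str.split₀ line) (-1) "" == "}" then "White Space"
          else PySem.List.pyGetD (PySem.Str.split₀ line) (-1) "") = k at he
        rcases pv_mem_store A k _ e he with hm | hm
        · exact h e hm
        · rw [hm]
          rcases hA : pvLookupV A k with _ | so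
          · simp [hA]
          · have := h (k, so) (pv_lookup_mem _ _ _ hA)
            simp [hA] at this ⊢
            omega

theorem pv_agg_nodup (iw : Bool) (line : String) (A : List (String × Int × Int))
    (h : (A.map Prod.fst).Nodup) : ((pvAgg iw A line).map Prod.fst).Nodup := by
  unfold pvAgg
  by_cases hemp : (PySem.Str.split₀ line).isEmpty
  · simpa [hemp] using h
  · simp only [hemp, Bool.false_eq_true, if_false]
    rcases hO : PySem.Int.ofStr? (PySem.List.pyGetD (PySem.Str.split₀ line) 1 "") with _ | n
    · simpa using h
    · simp only []
      by_cases hn : n ≤ 0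
      · simpa [hn] using h
      · simp only [hn, if_false]
        generalize (if !iw && PySem.List.pyGetD (PySem.Str.split₀ line) (-2) "" == "{" &&
          PySem.List.pyGetD (PySem.Str.split₀ line) (-1) "" == "}" then "White Space"
          else PySem.List.pyGetD (PySem.Str.split₀ line) (-1) "") = k
        rcases hA : pvLookupV A k with _ | so
        · rw [pv_store_of_none _ _ _ hA]
          simp only [List.map_append, List.map_cons, List.map_nil]
          apply List.Nodup.append h (List.nodup_singleton _)
          intro a ha hb
          simp only [List.mem_singleton] at hb
          subst hb
          exact (pv_lookup_eq_none _ _).mp hA ha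
        · rw [pv_map_fst_store_some _ _ _ (by rw [hA]; simp)]
          exact h

theorem pv_fold_agg_nodup (iw : Bool) :
    ∀ (ls : List String) (A : List (String × Int × Int)),
    (A.map Prod.fst).Nodup → ((ls.foldl (pvAgg iw) A).map Prod.fst).Nodup := by
  intro ls
  induction ls with
  | nil => intro A h; simpa using h
  | cons l ls ih => intro A h; exact ih _ (pv_agg_nodup iw l A h)

theorem pv_rebuild_nil (fn : String) (t : List (String × Int × List String)) :
    pvRebuild fn t [] = t := by
  have h : ∀ e : String × Int × List String, pvUpd fn [] e = e := fun _ => rfl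
  unfold pvRebuild
  simp only [List.filter_nil, List.map_nil, List.append_nil]
  have h2 : t.map (pvUpd fn []) = t.map id := List.map_congr_left fun e _ => h e
  simpa using h2

theorem pv_fold_merge (fn : String) (iw : Bool) :
    ∀ (ls : List String) (t : List (String × Int × List String))
      (A : List (String × Int × Int)),
    (t.map Prod.fst).Nodup → (∀ e ∈ A, 0 ≤ e.2.2) →
    ls.foldl (pvMerge fn iw) (pvRebuild fn t A) = pvRebuild fn t (ls.foldl (pvAgg iw) A) := by
  intro ls
  induction ls with
  | nil => intro t A _ _; simp
  | cons l ls ih =>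
    intro t A hnd hocc
    rw [List.foldl_cons, pv_merge_rebuild fn iw l t A hnd hocc, List.foldl_cons]
    exact ih t _ hnd (pv_agg_occ iw l A hocc)

-- B's append loop over the aggregate, in filter form
theorem pv_append_loop (fn : String) (A : List (String × Int × Int))
    (t : List (String × Int × List String)) :
    ∀ (todo done : List (String × Int × Int)),
    (((done ++ todo).map Prod.fst).Nodup) →
    todo.foldl (fun r e => if (pvLookupV r e.1).isNone then r ++ [pvMk fn e] else r)
      (t.map (pvUpd fn A) ++ (done.filter (fun e => (pvLookupV t e.1).isNone)).map (pvMk fn))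
    = t.map (pvUpd fn A) ++
        ((done ++ todo).filter (fun e => (pvLookupV t e.1).isNone)).map (pvMk fn) := by
  intro todo
  induction todo with
  | nil => intro done _; simp
  | cons e todo ih =>
    intro done hnd
    have hassoc : done ++ e :: todo = (done ++ [e]) ++ todo := by simp
    have hnd' : (((done ++ [e]) ++ todo).map Prod.fst).Nodup := by rw [← hassoc]; exact hnd
    have hnotin : e.1 ∉ done.map Prod.fst := by
      rw [hassoc] at hnd
      simp only [List.map_append] at hnd
      rcases List.disjoint_of_nodup_append ((List.nodup_append.mp hnd).1) with hdisj
      intro hmem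
      exact hdisj hmem (by simp)
    have hdone : pvLookupV ((done.filter (fun e => (pvLookupV t e.1).isNone)).map (pvMk fn)) e.1
        = none := by
      rw [pv_lookup_fm, (pv_lookup_eq_none done e.1).mpr hnotin]
      by_cases hq : (pvLookupV t e.1).isNone <;> simp [hq]
    have hcond : (pvLookupV (t.map (pvUpd fn A) ++
        (done.filter (fun e => (pvLookupV t e.1).isNone)).map (pvMk fn)) e.1).isNone
        = (pvLookupV t e.1).isNone := by
      rw [pv_lookup_append, pv_lookup_map_upd, hdone]
      rcases pvLookupV t e.1 with _ | v <;> simp [Option.or]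
    rw [List.foldl_cons]
    by_cases hp : (pvLookupV t e.1).isNone
    · rw [if_pos (by rw [hcond]; exact hp), List.append_assoc]
      have hfe : (done.filter (fun e => (pvLookupV t e.1).isNone)).map (pvMk fn) ++ [pvMk fn e]
          = ((done ++ [e]).filter (fun e => (pvLookupV t e.1).isNone)).map (pvMk fn) := by
        rw [List.filter_append, List.map_append]
        simp [List.filter_cons, hp]
      rw [hfe, ih (done ++ [e]) hnd', ← hassoc]
    · have hp' : (pvLookupV t e.1).isNone = false := Bool.eq_false_iff.mpr hp
      rw [if_neg (by rw [hcond]; simp [hp'])]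
      have hfe : (done.filter (fun e => (pvLookupV t e.1).isNone))
          = ((done ++ [e]).filter (fun e => (pvLookupV t e.1).isNone)) := by
        rw [List.filter_append]
        simp [List.filter_cons, hp']
      rw [hfe, ih (done ++ [e]) hnd', ← hassoc]

-- ----- the capture start in closed form -----

theorem pv_find_done (lines : List String) (cp : String) (th : Int) :
    ∀ (i : Nat), i ≤ lines.length →
    pvFindStart lines cp th (PySem.List.pyRange (i : Int) (lines.length : Int) 1) th
      = (i : Int) := by
  intro i hi
  rcases lt_or_eq_of_le hi with h | h
  · rw [PySem.List.pyRange_one_cons (by exact_mod_cast h)]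
    simp [pvFindStart]
  · rw [PySem.List.pyRange_one_eq_nil (by exact_mod_cast h.ge)]
    simp [pvFindStart, h]

theorem pv_find_aux (lines : List String) (cp : String) (th : Int) :
    ∀ (k i : Nat) (c : Int), lines.length ≤ i + k → c < th →
    pvFindStart lines cp th (PySem.List.pyRange (i : Int) (lines.length : Int) 1) c =
      (match ((PySem.List.pyRange (i : Int) (lines.length : Int) 1).filter
          (fun idx => PySem.Str.isIn cp (PySem.List.pyGetD lines idx "") ||
            PySem.Str.isIn cp (PySem.List.pyGetD lines (idx - 1) ""))).drop (th - c - 1).toNat with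
       | [] => (lines.length : Int)
       | m :: _ => m + 1) := by
  intro k
  induction k with
  | zero =>
    intro i c hk _
    rw [PySem.List.pyRange_one_eq_nil (by exact_mod_cast by omega)]
    simp [pvFindStart]
  | succ k ih =>
    intro i c hk hc
    by_cases hi : lines.length ≤ i
    · rw [PySem.List.pyRange_one_eq_nil (by exact_mod_cast hi)]
      simp [pvFindStart]
    · push_neg at hi
      rw [PySem.List.pyRange_one_cons (by exact_mod_cast hi)]
      have hbeq : (c == th) = false := by simp; omega
      simp only [pvFindStart, hbeq, Bool.false_eq_true, if_false, List.filter_cons]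
      have hcast : ((i : Int) + 1) = ((i + 1 : Nat) : Int) := by push_cast; ring
      by_cases hcnd : (PySem.Str.isIn cp (PySem.List.pyGetD lines (i : Int) "") ||
          PySem.Str.isIn cp (PySem.List.pyGetD lines ((i : Int) - 1) "")) = true
      · simp only [hcnd, if_true]
        by_cases hth : c + 1 = th
        · rw [hth, hcast, pv_find_done lines cp th (i + 1) (by omega)]
          have h0 : (th - c - 1).toNat = 0 := by omega
          rw [h0, List.drop_zero]
          push_cast
          ring
        · rw [hcast, ih (i + 1) (c + 1) (by omega) (by omega)]
          have h1 : (th - c - 1).toNat = (th - (c + 1) - 1).toNat + 1 := by omega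
          rw [h1, List.drop_succ_cons]
      · have hcnd2 : (PySem.Str.isIn cp (PySem.List.pyGetD lines (i : Int) "") ||
            PySem.Str.isIn cp (PySem.List.pyGetD lines ((i : Int) - 1) "")) = false :=
          Bool.eq_false_iff.mpr hcnd
        simp only [hcnd2, Bool.false_eq_true, if_false]
        rw [hcast, ih (i + 1) c (by omega) hc]

theorem pv_start_eq (lines : List String) (cp : String) (th : Int) (hth : 0 < th) :
    (if th ≤ (((PySem.List.pyRange 0 (lines.length : Int) 1).filter
        (fun idx => PySem.Str.isIn cp (PySem.List.pyGetD lines idx "") ||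
          PySem.Str.isIn cp (PySem.List.pyGetD lines (idx - 1) ""))).length : Int)
     then PySem.List.pyGetD ((PySem.List.pyRange 0 (lines.length : Int) 1).filter
        (fun idx => PySem.Str.isIn cp (PySem.List.pyGetD lines idx "") ||
          PySem.Str.isIn cp (PySem.List.pyGetD lines (idx - 1) ""))) (th - 1) 0 + 1
     else (lines.length : Int)) =
    pvFindStart lines cp th (PySem.List.pyRange 0 (lines.length : Int) 1) 0 := by
  have h := pv_find_aux lines cp th lines.length 0 0 (by omega) hth
  rw [show ((0 : Nat) : Int) = (0 : Int) by simp] at h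
  rw [h]
  generalize ((PySem.List.pyRange 0 (lines.length : Int) 1).filter
    (fun idx => PySem.Str.isIn cp (PySem.List.pyGetD lines idx "") ||
      PySem.Str.isIn cp (PySem.List.pyGetD lines (idx - 1) ""))) = ms
  rcases hd : ms.drop (th - 0 - 1).toNat with _ | ⟨m, r⟩
  · have hlen : ms.length ≤ (th - 0 - 1).toNat := List.drop_eq_nil_iff.mp hd
    rw [if_neg (by omega)]
  · have hlen : (th - 0 - 1).toNat < ms.length := by
      by_contra hcon
      rw [List.drop_eq_nil_iff.mpr (by omega)] at hd
      simp at hd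
    have hget : PySem.List.pyGetD ms (th - 1) 0 = m := by
      rw [PySem.List.pyGetD_eq_getElem ms 0 (by omega) (by push_cast; omega)]
      have h0 : (ms.drop (th - 0 - 1).toNat)[0]? = ms[(th - 0 - 1).toNat + 0]? :=
        List.getElem?_drop
      rw [hd] at h0
      simp only [List.getElem?_cons_zero, Nat.add_zero] at h0
      apply (List.getElem_eq_iff (by omega)).mpr
      rw [show (th - 1).toNat = (th - 0 - 1).toNat by omega]
      exact h0.symm
    rw [if_pos (by push_cast; omega), hget]

-- B in rebuild form
theorem pv_alt_eq (input_text : String) (word_count char_count : List (String × Int × List String))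
    (filename : String) (is_word : Bool) :
    extract_words_chars_error_alt input_text word_count char_count filename is_word =
      (let lines := (PySem.Str.split? input_text "\n").getD []
       let cp := if is_word then "Non-stopwords" else "Count   Missed   %Right"
       let start := pvFindStart lines cp (if is_word then 6 else 3)
          (PySem.List.pyRange 0 (lines.length : Int) 1) 0
       let totals := (PySem.List.slice lines (some start) none).foldl (pvAgg is_word) []
       if is_word then (pvRebuild filename word_count totals, char_count)
       else (word_count, pvRebuild filename char_count totals)) := by
  unfold extract_words_chars_error_alt
  simp only [PySem.List.pyRepeat_singleton]
  rw [pv_start_eq _ _ _ (by cases is_word <;> norm_num)]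
  generalize hT : ((PySem.List.slice ((PySem.Str.split? input_text "\n").getD [])
      (some (pvFindStart ((PySem.Str.split? input_text "\n").getD [])
        (if is_word then "Non-stopwords" else "Count   Missed   %Right")
        (if is_word then 6 else 3)
        (PySem.List.pyRange 0 ((((PySem.Str.split? input_text "\n").getD []).length : Nat) : Int) 1)
        0)) none).foldl (pvAgg is_word) []) = totals
  have hnd : (totals.map Prod.fst).Nodup := by
    rw [← hT]; exact pv_fold_agg_nodup _ _ _ (by simp)
  have hloop := pv_append_loop filename totals
    (if is_word then word_count else char_count) totals [] (by simpa using hnd)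
  simp only [List.nil_append, List.filter_nil, List.map_nil, List.append_nil] at hloop
  cases is_word
  · simp only [Bool.false_eq_true, if_false] at hloop ⊢
    exact congrArg (Prod.mk word_count) (hloop.trans rfl)
  · simp only [if_true] at hloop ⊢
    exact congrArg (fun x => (x, char_count)) (hloop.trans rfl)

-- ===== VERDICT (by name: the statement is the Claim_ definition above) =====
theorem extract_words_chars_error_spec : Claim_equal_extract_words_chars_error := by
  unfold Claim_equal_extract_words_chars_error
  intro input_text word_count char_count filename is_word _ hpre
  obtain ⟨_, hnd⟩ := hpre
  unfold Spec_extract_words_chars_error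
  rw [pv_alt_eq]
  unfold extract_words_chars_error
  have h := pv_phase ((PySem.Str.split? input_text "\n").getD [])
    (if is_word then "Non-stopwords" else "Count   Missed   %Right") filename is_word
    ((PySem.Str.split? input_text "\n").getD []) 0 0 word_count char_count (by simp)
  simp only [Nat.cast_zero] at h
  rw [show ∀ st : Bool × Int × List (String × Int × List String) × List (String × Int × List String),
      (st.2.2.1, st.2.2.2) = st.2.2 from fun st => rfl]
  rw [h]
  have hfold := pv_fold_merge filename is_word
    (PySem.List.slice ((PySem.Str.split? input_text "\n").getD [])
      (some (pvFindStart ((PySem.Str.split? input_text "\n").getD [])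
        (if is_word then "Non-stopwords" else "Count   Missed   %Right")
        (if is_word then 6 else 3)
        (PySem.List.pyRange 0 ((((PySem.Str.split? input_text "\n").getD []).length : Nat) : Int) 1)
        0)) none)
    (if is_word then word_count else char_count) [] hnd (by simp)
  rw [pv_rebuild_nil] at hfold
  cases is_word
  · simp only [Bool.false_eq_true, if_false] at hfold ⊢
    rw [hfold]
  · simp only [if_true] at hfold ⊢
    rw [hfold]
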